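-- pv_equiv track=rewrite | github.com/jongwanra/algorithm-python | algorithm/exhaustive_search/모음사전/250714.py | solution
-- ===== SOURCE A (Python) =====
-- selected = []
--
-- result = set()
--
-- alphabets = ['', 'A', 'E', 'I', 'O', 'U']
--
-- def make_dictionary(depth:int):
--     if depth == 5:
--         temp = ""
--         for s in selected:
--             if s == '':
--                 continue
--             temp += s
--         result.add(temp)
--         return
--
--     for index in range(0, len(alphabets)):
--         selected.append(alphabets[index])
--         make_dictionary(depth + 1)
--         selected.pop()
--
-- def solution(word):
--     make_dictionary(0)
--
--     answer = list(result)
--     answer.sort()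
--     for index in range(len(answer)):
--         if answer[index] == word:
--             return index
--
--     return 0
-- ===== SOURCE B (Python) =====
-- VOWELS = "AEIOU"
-- WEIGHTS = [781, 156, 31, 6, 1]  # number of words of length <= 4,3,2,1,0 over 5 letters
--
--
-- def solution(word):
--     if len(word) > 5:
--         return 0
--     rank = 0
--     for ch, w in zip(word, WEIGHTS):
--         k = VOWELS.find(ch)
--         if k == -1:
--             return 0
--         rank += k * w + 1
--     return rank
-- ===== Notes on version B (the rewrite author's own statement) =====
-- stated objective: faster
-- what changed: B replaces A's exhaustive generation of all 3906 vowel words, set dedup, sort, and linear scan by a closed-form positional rank formula summing k*weight+1 per character.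
import Mathlib
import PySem

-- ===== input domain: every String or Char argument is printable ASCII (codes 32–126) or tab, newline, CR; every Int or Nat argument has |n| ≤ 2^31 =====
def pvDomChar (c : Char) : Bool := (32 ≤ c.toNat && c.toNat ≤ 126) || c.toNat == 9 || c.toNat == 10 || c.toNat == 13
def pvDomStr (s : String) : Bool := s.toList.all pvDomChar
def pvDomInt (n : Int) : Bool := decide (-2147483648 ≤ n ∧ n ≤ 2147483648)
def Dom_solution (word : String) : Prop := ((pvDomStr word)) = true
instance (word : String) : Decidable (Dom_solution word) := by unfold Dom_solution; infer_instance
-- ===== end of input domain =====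

-- B replaces A's generate-all-3906-words / dedup / sort / linear-scan by a per-character
-- closed-form rank formula (objective: faster — O(len word) instead of rebuilding the dictionary).

-- B replaces A's generate-all-words / dedup / sort / linear-scan pipeline by a per-character
-- closed-form rank formula (objective: faster).

-- ===== PORT A =====
def alphabetsA : List String := ["", "A", "E", "I", "O", "U"]

-- make_dictionary: the depth-0..5 recursion is transcribed as structural fuel = 5 - depth;
-- the mutated globals (selected, result) are threaded as the state pair.
def makeDict : Nat → List String × PySem.Set String → List String × PySem.Set String
  | 0, st =>
    let temp := st.1.foldl (fun t s => if s == "" then t else t ++ s) ""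
    (st.1, PySem.Set.add st.2 temp)
  | n + 1, st =>
    alphabetsA.foldl (fun st a =>
      let r := makeDict n (st.1 ++ [a], st.2)
      (r.1.dropLast, r.2)) st

-- for index in range(len(answer)): if answer[index] == word: return index;  return 0
def loopA (word : String) : List String → Int → Int
  | [], _ => 0
  | a :: rest, i => if a == word then i else loopA word rest (i + 1)

def solution (word : String) : Int :=
  let result := (makeDict 5 ([], PySem.Set.empty)).2
  let answer := PySem.List.sorted result (fun x => x)
  loopA word answer 0

-- ===== PORT B =====
-- for ch, w in zip(word, WEIGHTS): k = VOWELS.find(ch); if k == -1: return 0; rank += k*w + 1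
def goB : List Char → List Int → Int → Int
  | [], _, rank => rank
  | _ :: _, [], rank => rank
  | c :: cs, w :: ws, rank =>
    let k := PySem.Str.find "AEIOU" (String.ofList [c])
    if k == -1 then 0 else goB cs ws (rank + k * w + 1)

def solution_alt (word : String) : Int :=
  if 5 < PySem.Str.len word then 0
  else goB word.toList [781, 156, 31, 6, 1] 0

-- ===== PRECONDITION & SPEC =====
def Spec_solution (word : String) (out : Int) : Prop := out = solution_alt word
instance (word : String) (out : Int) : Decidable (Spec_solution word out) := by unfold Spec_solution; infer_instance

-- ===== CLAIM (what is proved, stated in full; the proofs are below) =====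
def Claim_equal_solution : Prop := ∀ (word : String), Dom_solution word → Spec_solution word (solution word)

-- ===== LEMMAS AND PROOFS =====

def vowelsL : List Char := ['A', 'E', 'I', 'O', 'U']
def W : Nat → List (List Char)
  | 0 => [[]]
  | n + 1 => [] :: ((W n).map ('A' :: ·) ++ (W n).map ('E' :: ·) ++ (W n).map ('I' :: ·) ++
      (W n).map ('O' :: ·) ++ (W n).map ('U' :: ·))

theorem mem_W (n : ℕ) (w : List Char) :
    w ∈ W n ↔ w.length ≤ n ∧ ∀ c ∈ w, c ∈ vowelsL := by
  induction n generalizing w with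
  | zero =>
    simp [W, List.length_eq_zero_iff]
    rintro rfl; simp
  | succ n ih =>
    simp only [W, List.mem_cons, List.mem_append, List.mem_map, ih]
    constructor
    · rintro (rfl | h)
      · simp
      · rcases h with ((((⟨u, ⟨hu1, hu2⟩, rfl⟩ | ⟨u, ⟨hu1, hu2⟩, rfl⟩) | ⟨u, ⟨hu1, hu2⟩, rfl⟩) |
          ⟨u, ⟨hu1, hu2⟩, rfl⟩) | ⟨u, ⟨hu1, hu2⟩, rfl⟩) <;>
        · refine ⟨by simpa using hu1, ?_⟩
          intro c hc
          rcases List.mem_cons.mp hc with rfl | hc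
          · simp [vowelsL]
          · exact hu2 c hc
    · rintro ⟨hl, hv⟩
      cases w with
      | nil => exact Or.inl rfl
      | cons c cs =>
        refine Or.inr ?_
        have hc : c ∈ vowelsL := hv c (by simp)
        have hcs : cs.length ≤ n ∧ ∀ x ∈ cs, x ∈ vowelsL :=
          ⟨by simpa using hl, fun x hx => hv x (List.mem_cons_of_mem _ hx)⟩
        fin_cases hc
        · exact Or.inl (Or.inl (Or.inl (Or.inl ⟨cs, hcs, rfl⟩)))
        · exact Or.inl (Or.inl (Or.inl (Or.inr ⟨cs, hcs, rfl⟩)))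
        · exact Or.inl (Or.inl (Or.inr ⟨cs, hcs, rfl⟩))
        · exact Or.inl (Or.inr ⟨cs, hcs, rfl⟩)
        · exact Or.inr ⟨cs, hcs, rfl⟩


theorem pairwise_W (n : ℕ) : (W n).Pairwise (· < ·) := by
  induction n with
  | zero => simp [W]
  | succ n ih =>
    have hmap : ∀ c : Char, ((W n).map (c :: ·)).Pairwise (· < ·) := by
      intro c
      rw [List.pairwise_map]
      exact ih.imp (fun h => List.cons_lt_cons_iff.mpr (Or.inr ⟨rfl, h⟩))
    have hcross : ∀ (c d : Char), c < d →
        ∀ x ∈ (W n).map (c :: ·), ∀ y ∈ (W n).map (d :: ·), x < y := by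
      rintro c d hcd x hx y hy
      simp only [List.mem_map] at hx hy
      obtain ⟨u, _, rfl⟩ := hx
      obtain ⟨v, _, rfl⟩ := hy
      exact List.cons_lt_cons_iff.mpr (Or.inl hcd)
    refine List.pairwise_cons.mpr ⟨?_, ?_⟩
    · intro b hb
      simp only [List.mem_append, List.mem_map] at hb
      rcases hb with ((((⟨u,_,rfl⟩|⟨u,_,rfl⟩)|⟨u,_,rfl⟩)|⟨u,_,rfl⟩)|⟨u,_,rfl⟩) <;>
        exact List.nil_lt_cons _ _
    · simp only [List.pairwise_append]
      refine ⟨⟨⟨⟨hmap _, hmap _, ?_⟩, hmap _, ?_⟩, hmap _, ?_⟩, hmap _, ?_⟩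
      · exact hcross _ _ (by decide)
      · intro x hx y hy
        rcases List.mem_append.mp hx with h | h
        · exact hcross _ _ (by decide) x h y hy
        · exact hcross _ _ (by decide) x h y hy
      · intro x hx y hy
        rcases List.mem_append.mp hx with h | h
        · rcases List.mem_append.mp h with h' | h'
          · exact hcross _ _ (by decide) x h' y hy
          · exact hcross _ _ (by decide) x h' y hy
        · exact hcross _ _ (by decide) x h y hy
      · intro x hx y hy
        rcases List.mem_append.mp hx with h | h
        · rcases List.mem_append.mp h with h' | h'
          · rcases List.mem_append.mp h' with h'' | h''
            · exact hcross _ _ (by decide) x h'' y hy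
            · exact hcross _ _ (by decide) x h'' y hy
          · exact hcross _ _ (by decide) x h' y hy
        · exact hcross _ _ (by decide) x h y hy

theorem nodup_W (n : ℕ) : (W n).Nodup := (pairwise_W n).imp ne_of_lt



def Cc (sel : List String) : String := sel.foldl (· ++ ·) ""

theorem fst_makeDict (n : ℕ) (st : List String × PySem.Set String) :
    (makeDict n st).1 = st.1 := by
  induction n generalizing st with
  | zero => rfl
  | succ n ih =>
    obtain ⟨sel, res⟩ := st
    simp [makeDict, alphabetsA, List.foldl, ih]

theorem temp_eq (sel : List String) :
    sel.foldl (fun t s => if s == "" then t else t ++ s) "" = Cc sel := by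
  unfold Cc
  apply PySem.List.foldl_congr_mem
  intro acc x hx
  by_cases h : x = ""
  · simp [h]
  · simp [h]

theorem Cc_append (sel : List String) (a : String) : Cc (sel ++ [a]) = Cc sel ++ a := by
  simp [Cc]

theorem mem_makeDict (n : ℕ) (sel : List String) (res : PySem.Set String) (x : String) :
    x ∈ (makeDict n (sel, res)).2 ↔
      x ∈ res ∨ ∃ w, (w.length ≤ n ∧ ∀ c ∈ w, c ∈ vowelsL) ∧ x = Cc sel ++ String.ofList w := by
  induction n generalizing sel res with
  | zero =>
    simp only [makeDict, temp_eq, PySem.Set.mem_add]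
    constructor
    · rintro (h | rfl)
      · exact Or.inl h
      · exact Or.inr ⟨[], by simp, by simp⟩
    · rintro (h | ⟨w, ⟨hw, -⟩, rfl⟩)
      · exact Or.inl h
      · obtain rfl : w = [] := List.eq_nil_of_length_eq_zero (Nat.le_zero.mp hw)
        exact Or.inr (by simp [show String.ofList ([]:List Char) = "" by decide])
  | succ n ih =>
    simp only [makeDict, alphabetsA, List.foldl, fst_makeDict, List.dropLast_concat, ih, Cc_append]
    have hof : ∀ (c : Char) (w : List Char), String.ofList (c :: w) = String.ofList [c] ++ String.ofList w := by
      intro c w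
      rw [show c :: w = [c] ++ w from rfl, String.ofList_append]
    have hA : String.ofList ['A'] = "A" := by decide
    have hE : String.ofList ['E'] = "E" := by decide
    have hI : String.ofList ['I'] = "I" := by decide
    have hO : String.ofList ['O'] = "O" := by decide
    have hU : String.ofList ['U'] = "U" := by decide
    have hvalid : ∀ (c : Char) (w : List Char), c ∈ vowelsL → (∀ x ∈ w, x ∈ vowelsL) →
        ∀ x ∈ c :: w, x ∈ vowelsL := by
      intro c w hc hw x hx
      rcases List.mem_cons.mp hx with rfl | hx
      · exact hc
      · exact hw x hx
    constructor
    · rintro ((((((h | ⟨w, ⟨h1, h2⟩, rfl⟩) | ⟨w, ⟨h1, h2⟩, rfl⟩) | ⟨w, ⟨h1, h2⟩, rfl⟩) |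
        ⟨w, ⟨h1, h2⟩, rfl⟩) | ⟨w, ⟨h1, h2⟩, rfl⟩) | ⟨w, ⟨h1, h2⟩, rfl⟩)
      · exact Or.inl h
      · exact Or.inr ⟨w, ⟨Nat.le_succ_of_le h1, h2⟩, by simp⟩
      · exact Or.inr ⟨'A' :: w, ⟨by simpa using h1, hvalid _ _ (by decide) h2⟩,
          by rw [hof, hA, String.append_assoc]⟩
      · exact Or.inr ⟨'E' :: w, ⟨by simpa using h1, hvalid _ _ (by decide) h2⟩,
          by rw [hof, hE, String.append_assoc]⟩
      · exact Or.inr ⟨'I' :: w, ⟨by simpa using h1, hvalid _ _ (by decide) h2⟩,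
          by rw [hof, hI, String.append_assoc]⟩
      · exact Or.inr ⟨'O' :: w, ⟨by simpa using h1, hvalid _ _ (by decide) h2⟩,
          by rw [hof, hO, String.append_assoc]⟩
      · exact Or.inr ⟨'U' :: w, ⟨by simpa using h1, hvalid _ _ (by decide) h2⟩,
          by rw [hof, hU, String.append_assoc]⟩
    · rintro (h | ⟨w, ⟨h1, h2⟩, rfl⟩)
      · exact Or.inl (Or.inl (Or.inl (Or.inl (Or.inl (Or.inl h)))))
      · cases w with
        | nil =>
          refine Or.inl (Or.inl (Or.inl (Or.inl (Or.inl (Or.inr ⟨[], ⟨Nat.zero_le _, by simp⟩, by simp⟩)))))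
        | cons c cs =>
          have hc : c ∈ vowelsL := h2 c (by simp)
          have h1' : cs.length ≤ n := by simpa using h1
          have h2' : ∀ x ∈ cs, x ∈ vowelsL := fun x hx => h2 x (List.mem_cons_of_mem _ hx)
          fin_cases hc
          · exact Or.inl (Or.inl (Or.inl (Or.inl (Or.inr ⟨cs, ⟨h1', h2'⟩,
              by rw [hof, hA, String.append_assoc]⟩))))
          · exact Or.inl (Or.inl (Or.inl (Or.inr ⟨cs, ⟨h1', h2'⟩,
              by rw [hof, hE, String.append_assoc]⟩)))
          · exact Or.inl (Or.inl (Or.inr ⟨cs, ⟨h1', h2'⟩,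
              by rw [hof, hI, String.append_assoc]⟩))
          · exact Or.inl (Or.inr ⟨cs, ⟨h1', h2'⟩,
              by rw [hof, hO, String.append_assoc]⟩)
          · exact Or.inr ⟨cs, ⟨h1', h2'⟩, by rw [hof, hU, String.append_assoc]⟩

theorem nodup_makeDict (n : ℕ) (st : List String × PySem.Set String) (h : st.2.Nodup) :
    ((makeDict n st).2).Nodup := by
  induction n generalizing st with
  | zero => exact PySem.Set.nodup_add _ _ h
  | succ n ih =>
    obtain ⟨sel, res⟩ := st
    simp only [makeDict, alphabetsA, List.foldl]
    exact ih _ (ih _ (ih _ (ih _ (ih _ (ih _ h)))))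

theorem ofList_injective : Function.Injective String.ofList := fun a b h =>
  String.ofList_inj.mp h

theorem answer_eq :
    PySem.List.sorted ((makeDict 5 ([], PySem.Set.empty)).2) (fun x => x) =
      (W 5).map String.ofList := by
  apply PySem.List.sorted_eq_of_perm_of_pairwise_lt
  · rw [List.perm_ext_iff_of_nodup ((nodup_W 5).map ofList_injective)
      (nodup_makeDict 5 _ (by exact List.nodup_nil))]
    intro a
    rw [mem_makeDict]
    simp only [PySem.Set.empty, List.not_mem_nil, false_or, List.mem_map, mem_W]
    constructor
    · rintro ⟨w, hw, rfl⟩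
      exact ⟨w, hw, by simp [Cc]⟩
    · rintro ⟨w, hw, rfl⟩
      exact ⟨w, hw, by simp [Cc]⟩
  · rw [List.pairwise_map]
    exact (pairwise_W 5).imp (fun h => String.lt_iff_toList_lt.mpr (by simpa))


theorem loopA_eq (word : String) (l : List String) (i : Int) :
    loopA word l i = if word ∈ l then i + (List.idxOf word l : Int) else 0 := by
  induction l generalizing i with
  | nil => simp [loopA]
  | cons a rest ih =>
    simp only [loopA, List.idxOf_cons, List.mem_cons]
    by_cases h : a = word
    · subst h
      simp
    · have hne : a ≠ word := h
      rw [if_neg (by simpa using hne), ih]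
      by_cases hm : word ∈ rest
      · rw [if_pos hm, if_pos (Or.inr hm)]
        simp only [Bool.cond_eq_ite, beq_iff_eq]
        rw [if_neg (fun hh => hne hh)]
        push_cast
        ring
      · rw [if_neg hm, if_neg (by rintro (rfl | hc) <;> [exact hne rfl; exact hm hc])]

theorem idxOf_map_cons (c : Char) (l : List (List Char)) (cs : List Char) :
    List.idxOf (c :: cs) (l.map (c :: ·)) = List.idxOf cs l := by
  induction l with
  | nil => simp
  | cons a t ih =>
    simp only [List.map_cons, List.idxOf_cons]
    have : (c :: a == c :: cs) = (a == cs) := by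
      simp [List.cons_beq_cons]
    rw [this, ih]

theorem idxOf_map_ofList (w : List Char) (l : List (List Char)) :
    List.idxOf (String.ofList w) (l.map String.ofList) = List.idxOf w l := by
  induction l with
  | nil => simp
  | cons a t ih =>
    simp only [List.map_cons, List.idxOf_cons]
    have : (String.ofList a == String.ofList w) = (a == w) := by
      by_cases h : a = w
      · simp [h]
      · simp [beq_eq_false_iff_ne.mpr h, beq_eq_false_iff_ne.mpr (fun hh => h (String.ofList_inj.mp hh))]
    rw [this, ih]

def rankW : Nat → List Char → Int
  | _, [] => 0
  | 0, _ :: _ => 0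
  | n + 1, c :: cs => (List.idxOf c vowelsL : Int) * (W n).length + 1 + rankW n cs

theorem idx_rank (n : ℕ) (w : List Char) (hl : w.length ≤ n) (hv : ∀ c ∈ w, c ∈ vowelsL) :
    (List.idxOf w (W n) : Int) = rankW n w := by
  induction n generalizing w with
  | zero =>
    obtain rfl : w = [] := List.eq_nil_of_length_eq_zero (Nat.le_zero.mp hl)
    simp [W, rankW]
  | succ n ih =>
    cases w with
    | nil => simp [W, rankW]
    | cons c cs =>
      have hc : c ∈ vowelsL := hv c (by simp)
      have hcs_len : cs.length ≤ n := by simpa using hl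
      have hcs_v : ∀ x ∈ cs, x ∈ vowelsL := fun x hx => hv x (List.mem_cons_of_mem _ hx)
      have hlen : ∀ d : Char, ((W n).map (d :: ·)).length = (W n).length := by simp
      have hrw : rankW (n+1) (c :: cs) = (List.idxOf c vowelsL : Int) * (W n).length + 1 + rankW n cs := rfl
      rw [show W (n+1) = [] :: ((W n).map ('A' :: ·) ++ (W n).map ('E' :: ·) ++ (W n).map ('I' :: ·) ++
        (W n).map ('O' :: ·) ++ (W n).map ('U' :: ·)) from rfl]
      rw [List.idxOf_cons]
      simp only [show (([] : List Char) == c :: cs) = false from by simp, cond_false]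
      fin_cases hc
      all_goals {
        have hcsW : cs ∈ W n := (mem_W n cs).mpr ⟨hcs_len, hcs_v⟩
        simp only [List.idxOf_append, hlen]
        rw [hrw, ← ih cs hcs_len hcs_v]
        simp [List.mem_map, hcsW, idxOf_map_cons, vowelsL]
        try push_cast
        try ring
      }

def weightsW : Nat → List Int
  | 0 => []
  | n + 1 => ((W n).length : Int) :: weightsW n


theorem find_vowel (c : Char) (hc : c ∈ vowelsL) :
    PySem.Str.find "AEIOU" (String.ofList [c]) = (List.idxOf c vowelsL : Int) := by
  fin_cases hc <;> decide

theorem singleton_infix_iff (c : Char) (l : List Char) : [c] <:+: l ↔ c ∈ l := by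
  constructor
  · intro h
    exact h.mem (List.mem_singleton_self c)
  · intro h
    obtain ⟨s, t, rfl⟩ := List.append_of_mem h
    exact ⟨s, t, by simp⟩

theorem find_nonvowel (c : Char) (hc : c ∉ vowelsL) :
    PySem.Str.find "AEIOU" (String.ofList [c]) = -1 := by
  rw [PySem.Str.find_eq_neg_one_iff]
  rw [show (String.ofList [c]).toList = [c] from String.toList_ofList]
  rw [singleton_infix_iff]
  simpa [vowelsL] using hc

theorem goB_rank (n : ℕ) (w : List Char) (r : Int) (hl : w.length ≤ n)
    (hv : ∀ c ∈ w, c ∈ vowelsL) : goB w (weightsW n) r = r + rankW n w := by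
  induction n generalizing w r with
  | zero =>
    obtain rfl : w = [] := List.eq_nil_of_length_eq_zero (Nat.le_zero.mp hl)
    simp [goB, rankW]
  | succ n ih =>
    cases w with
    | nil => simp [goB, rankW]
    | cons c cs =>
      have hc : c ∈ vowelsL := hv c (by simp)
      have hcs_len : cs.length ≤ n := by simpa using hl
      have hcs_v : ∀ x ∈ cs, x ∈ vowelsL := fun x hx => hv x (List.mem_cons_of_mem _ hx)
      show (if (PySem.Str.find "AEIOU" (String.ofList [c]) == -1) = true then 0
        else goB cs (weightsW n) (r + PySem.Str.find "AEIOU" (String.ofList [c]) * ((W n).length : Int) + 1)) = _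
      rw [find_vowel c hc]
      rw [if_neg (by simp)]
      rw [ih cs _ hcs_len hcs_v]
      show _ = r + ((List.idxOf c vowelsL : Int) * (W n).length + 1 + rankW n cs)
      ring

theorem goB_invalid (w : List Char) (ws : List Int) (r : Int)
    (hv : ¬ ∀ c ∈ w, c ∈ vowelsL) (hl : w.length ≤ ws.length) : goB w ws r = 0 := by
  induction w generalizing ws r with
  | nil => exact absurd (by simp) hv
  | cons c cs ih =>
    cases ws with
    | nil => simp at hl
    | cons v vs =>
      by_cases hc : c ∈ vowelsL
      · show (if (PySem.Str.find "AEIOU" (String.ofList [c]) == -1) = true then 0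
          else goB cs vs (r + PySem.Str.find "AEIOU" (String.ofList [c]) * v + 1)) = 0
        rw [find_vowel c hc, if_neg (by simp)]
        refine ih vs _ ?_ (by simpa using hl)
        intro hall
        exact hv (fun x hx => by
          rcases List.mem_cons.mp hx with rfl | hx
          · exact hc
          · exact hall x hx)
      · show (if (PySem.Str.find "AEIOU" (String.ofList [c]) == -1) = true then 0
          else goB cs vs (r + PySem.Str.find "AEIOU" (String.ofList [c]) * v + 1)) = 0
        rw [find_nonvowel c hc]
        simp



set_option maxRecDepth 4000 in
theorem weights5 : weightsW 5 = [781, 156, 31, 6, 1] := by decide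

theorem strlen_toList (word : String) : PySem.Str.len word = (word.toList.length : Int) := by
  simp [PySem.Str.len_eq, String.length_toList]

theorem main_eq (word : String) : solution word = solution_alt word := by
  show loopA word (PySem.List.sorted ((makeDict 5 ([], PySem.Set.empty)).2) (fun x => x)) 0 =
    if 5 < PySem.Str.len word then 0 else goB word.toList [781, 156, 31, 6, 1] 0
  rw [answer_eq, loopA_eq, strlen_toList]
  by_cases h : word.toList.length ≤ 5 ∧ ∀ c ∈ word.toList, c ∈ vowelsL
  · have hmem : word ∈ (W 5).map String.ofList :=
      List.mem_map.mpr ⟨word.toList, (mem_W 5 _).mpr h, String.ofList_toList⟩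
    have hidx : (List.idxOf word ((W 5).map String.ofList) : Int) = rankW 5 word.toList := by
      conv_lhs => rw [show word = String.ofList word.toList from String.ofList_toList.symm]
      rw [idxOf_map_ofList]
      exact idx_rank 5 _ h.1 h.2
    rw [if_pos hmem, hidx, if_neg (by have h1 := h.1; omega), ← weights5, goB_rank 5 _ 0 h.1 h.2]
    try ring
  · have hmem : word ∉ (W 5).map String.ofList := by
      intro hm
      obtain ⟨w, hw, rfl⟩ := List.mem_map.mp hm
      rw [String.toList_ofList] at h
      exact h ((mem_W 5 w).mp hw)
    rw [if_neg hmem]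
    by_cases hlen : 5 < word.toList.length
    · rw [if_pos (by exact_mod_cast hlen)]
    · rw [if_neg (by omega)]
      have hv : ¬ ∀ c ∈ word.toList, c ∈ vowelsL := fun hvv => h ⟨by omega, hvv⟩
      rw [goB_invalid _ _ 0 hv (by simpa using Nat.not_lt.mp hlen)]

-- ===== VERDICT (by name: the statement is the Claim_ definition above) =====
theorem solution_spec : Claim_equal_solution := by
  intro word _
  exact main_eq word
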